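-- pv_equiv track=rewrite | github.com/ASSERT-KTH/Mokav | experiments/pynguin/c4b/return-lst/generated_tests/src_515/0/src_515.py | func
-- ===== SOURCE A (Python) =====
-- def func(*args):
-- 	ret_values = []
--
-- 	iniStr = args[0]
-- 	strLen = len(iniStr)
-- 	ans = str()
-- 	index = 0
-- 	while (index < strLen):
-- 	    theLower = iniStr[index].lower()
-- 	    if ((theLower == 'a') or (theLower == 'e') or (theLower == 'i') or (theLower == 'o') or (theLower == 'u') or (theLower == 'y')):
-- 	        index = (index + 1)
-- 	        continue
-- 	    else:
-- 	        ans = ((ans + '.') + theLower)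
-- 	        index = (index + 1)
-- 	ret_values.append(ans)
--
-- 	return ret_values
-- ===== SOURCE B (Python) =====
-- def func(*args):
--     s = args[0]
--     # Build a translation table once: each character code maps to its
--     # replacement ('' for vowels, '.'+lowercase otherwise), then translate.
--     table = {}
--     for ch in s:
--         low = ch.lower()
--         table[ord(ch)] = '' if low in 'aeiouy' else '.' + low
--     return [s.translate(table)]
-- ===== Notes on version B (the rewrite author's own statement) =====
-- stated objective: faster
-- what changed: Replaces the index-driven while loop that grows the answer by repeated string concatenation with a precomputed per-character translation table (dict of char code to replacement) applied in one str.translate call.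
import Mathlib
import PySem

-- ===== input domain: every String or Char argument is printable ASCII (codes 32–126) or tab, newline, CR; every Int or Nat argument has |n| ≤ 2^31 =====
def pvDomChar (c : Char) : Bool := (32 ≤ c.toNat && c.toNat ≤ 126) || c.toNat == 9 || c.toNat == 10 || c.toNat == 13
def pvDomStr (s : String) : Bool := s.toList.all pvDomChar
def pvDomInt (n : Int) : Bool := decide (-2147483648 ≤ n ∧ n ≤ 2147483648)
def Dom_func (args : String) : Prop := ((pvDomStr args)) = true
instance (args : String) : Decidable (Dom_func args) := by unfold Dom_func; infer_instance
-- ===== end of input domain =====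

-- B builds a translation table (char ↦ replacement string) in one pass and then
-- applies it with a single translate-style lookup pass, instead of A's fused
-- while loop that branches per character and grows the answer by concatenation.

-- ===== PORT A =====
-- A's while loop over indices 0..strLen, carrying the growing answer 'ans'
-- (represented as its character list; each step reads the next character).
def funcLoop : List Char → List Char → List Char
  | acc, [] => acc
  | acc, c :: rest =>
    let theLower := PySem.Chars.lowerChar c
    if theLower = 'a' ∨ theLower = 'e' ∨ theLower = 'i' ∨ theLower = 'o' ∨
       theLower = 'u' ∨ theLower = 'y' then
      funcLoop acc rest
    else
      funcLoop (acc ++ ['.'] ++ [theLower]) rest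

def func (args : String) : List String :=
  [String.mk (funcLoop [] args.toList)]

-- ===== PORT B =====
-- the replacement a table entry gets for character ch ('' for vowels)
def funcRepl (ch : Char) : List Char :=
  let low := PySem.Chars.lowerChar ch
  if low = 'a' ∨ low = 'e' ∨ low = 'i' ∨ low = 'o' ∨ low = 'u' ∨ low = 'y'
  then [] else ['.', low]

def func_alt (args : String) : List String :=
  let cs := args.toList
  let table : PySem.Dict Char (List Char) :=
    cs.foldl (fun d ch => d.insert ch (funcRepl ch)) PySem.Dict.empty
  -- str.translate: each character is replaced by its table entry
  -- (an unmapped character would stay itself; here every character is mapped)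
  [String.mk (cs.flatMap (fun c => table.getD c [c]))]

-- ===== PRECONDITION & SPEC =====
def Spec_func (args : String) (out : List String) : Prop := out = func_alt args
instance (args : String) (out : List String) : Decidable (Spec_func args out) := by unfold Spec_func; infer_instance

-- ===== CLAIM (what is proved, stated in full; the proofs are below) =====
def Claim_equal_func : Prop := ∀ (args : String), Dom_func args → Spec_func args (func args)

-- ===== LEMMAS AND PROOFS =====
-- looking up c in a table built by inserting funcRepl x at every x yields funcRepl c
theorem getD_tableFold (l : List Char) (d : PySem.Dict Char (List Char)) (c : Char)
    (h : c ∈ l ∨ d.getD c [c] = funcRepl c) :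
    (l.foldl (fun d x => d.insert x (funcRepl x)) d).getD c [c] = funcRepl c := by
  induction l generalizing d with
  | nil => simpa using h
  | cons a l ih =>
    simp only [List.foldl_cons]
    apply ih
    by_cases hac : c = a
    · right; subst hac; simp [PySem.Dict.getD_insert_self]
    · rcases h with h | h
      · rcases List.mem_cons.mp h with h | h
        · exact absurd h hac
        · exact Or.inl h
      · right; rw [PySem.Dict.getD_insert]; simp [hac, h]

theorem funcLoop_eq (cs acc : List Char) :
    funcLoop acc cs = acc ++ cs.flatMap funcRepl := by
  induction cs generalizing acc with
  | nil => simp [funcLoop]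
  | cons c rest ih =>
    simp only [funcLoop, List.flatMap_cons]
    by_cases h : PySem.Chars.lowerChar c = 'a' ∨ PySem.Chars.lowerChar c = 'e' ∨
        PySem.Chars.lowerChar c = 'i' ∨ PySem.Chars.lowerChar c = 'o' ∨
        PySem.Chars.lowerChar c = 'u' ∨ PySem.Chars.lowerChar c = 'y' <;>
      simp [h, ih, funcRepl, List.append_assoc]

-- ===== VERDICT (by name: the statement is the Claim_ definition above) =====
theorem func_spec : Claim_equal_func := by
  intro args _
  unfold Spec_func func func_alt
  simp only [funcLoop_eq, List.nil_append, List.cons.injEq, and_true]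
  congr 1
  apply List.flatMap_congr
  intro c hc
  exact (getD_tableFold _ _ _ (Or.inl hc)).symm
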